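-- pv_equiv track=rewrite | github.com/ItayHaroush/Web2026 | chefsync-restaurant/virtual_printer.py | is_marker_only_line
-- ===== SOURCE A (Python) =====
-- MARKERS = (
--     '{{BIG}}',
--     '{{/BIG}}',
--     '{{CENTER}}',
--     '{{/CENTER}}',
--     '{{BOLD}}',
--     '{{/BOLD}}',
--     '{{QR}}',
--     '{{HEADING}}',
--     '{{/HEADING}}',
--     '{{CENTER_HW}}',
--     '{{/CENTER_HW}}',
-- )
--
-- def is_marker_only_line(line: str) -> bool:
--     remaining = line.strip()
--     if not remaining:
--         return False
--
--     while remaining: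
--         for marker in MARKERS:
--             if remaining.startswith(marker):
--                 remaining = remaining[len(marker):].lstrip()
--                 break
--         else:
--             return False
--
--     return True
-- ===== SOURCE B (Python) =====
-- MARKERS = (
--     '{{BIG}}',
--     '{{/BIG}}',
--     '{{CENTER}}',
--     '{{/CENTER}}',
--     '{{BOLD}}',
--     '{{/BOLD}}',
--     '{{QR}}',
--     '{{HEADING}}',
--     '{{/HEADING}}',
--     '{{CENTER_HW}}',
--     '{{/CENTER_HW}}',
-- )
--
--
-- def is_marker_only_line(line: str) -> bool:
--     # Instead of trying every marker as a prefix, locate the next closing delimiter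
--     # delimiter and check the delimited chunk for membership in MARKERS.
--     s = line.strip()
--     if not s:
--         return False
--     while s:
--         j = s.find('}}')
--         if j == -1 or s[:j + 2] not in MARKERS:
--             return False
--         s = s[j + 2:].lstrip()
--     return True
-- ===== Notes on version B (the rewrite author's own statement) =====
-- stated objective: alternative
-- what changed: Instead of scanning the 11-marker tuple with startswith on every iteration, B finds the next closing-brace delimiter, takes the chunk up to it and tests that single chunk for membership in MARKERS.
import Mathlib
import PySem

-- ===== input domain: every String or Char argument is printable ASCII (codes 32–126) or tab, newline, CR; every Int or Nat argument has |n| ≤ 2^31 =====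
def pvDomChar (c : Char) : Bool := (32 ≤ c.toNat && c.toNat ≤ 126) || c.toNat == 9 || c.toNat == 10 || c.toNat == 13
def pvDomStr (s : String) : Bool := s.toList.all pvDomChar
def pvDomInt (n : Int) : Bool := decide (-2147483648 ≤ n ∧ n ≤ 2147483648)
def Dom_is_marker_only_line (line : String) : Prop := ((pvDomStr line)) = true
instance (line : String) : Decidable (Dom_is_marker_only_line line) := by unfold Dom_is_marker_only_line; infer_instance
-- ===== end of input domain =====

-- B replaces A's per-marker startswith scan by finding the next closing-brace delimiter and
-- testing that single chunk for membership in MARKERS (alternative decomposition, same results).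


-- the module constant MARKERS (identical in A and B)
def pvMarkers : List (List Char) :=
  ["{{BIG}}".toList, "{{/BIG}}".toList, "{{CENTER}}".toList, "{{/CENTER}}".toList,
   "{{BOLD}}".toList, "{{/BOLD}}".toList, "{{QR}}".toList, "{{HEADING}}".toList,
   "{{/HEADING}}".toList, "{{CENTER_HW}}".toList, "{{/CENTER_HW}}".toList]

-- ===== PORT A =====
-- the for-marker-in-MARKERS loop with its break/else: first marker that is a prefix,
-- returning remaining[len(marker):].lstrip(); none = the for-else 'return False' case
def pvAStep : List (List Char) → List Char → Option (List Char)
  | [], _ => none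
  | m :: ms, rem =>
    if PySem.Chars.startswith rem m then
      some (PySem.Chars.lstrip (rem.drop m.length))
    else pvAStep ms rem

-- consuming a (nonempty) marker prefix strictly shortens the remainder (for termination)
theorem pvAStep_length_lt : ∀ (ms : List (List Char)) (rem r : List Char),
    (∀ m ∈ ms, m ≠ []) → pvAStep ms rem = some r → r.length < rem.length := by
  intro ms
  induction ms with
  | nil => intro rem r _ h; simp [pvAStep] at h
  | cons m ms ih =>
    intro rem r hne h
    simp only [pvAStep] at h
    split at h
    · rename_i hsw
      have hpre : m <+: rem := (PySem.Chars.startswith_iff rem m).mp hsw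
      have hml : 1 ≤ m.length := by
        have : m ≠ [] := hne m (by simp)
        cases m <;> simp_all
      have hlen : m.length ≤ rem.length := hpre.length_le
      have hr : r = PySem.Chars.lstrip (rem.drop m.length) := (Option.some.inj h).symm
      have : r.length ≤ (rem.drop m.length).length := by
        rw [hr, show PySem.Chars.lstrip (rem.drop m.length)
            = (rem.drop m.length).dropWhile PySem.Chars.isspace by simp [PySem.Chars.lstrip]]
        exact List.length_dropWhile_le _ _
      simp only [List.length_drop] at this
      omega
    · exact ih rem r (fun x hx => hne x (by simp [hx])) h

-- the while-remaining loop of A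
def pvALoop (rem : List Char) : Bool :=
  if h : rem = [] then true
  else
    match hstep : pvAStep pvMarkers rem with
    | some r => pvALoop r
    | none => false
termination_by rem.length
decreasing_by
  exact pvAStep_length_lt pvMarkers rem r (by decide) hstep

def is_marker_only_line (line : String) : Bool :=
  let remaining := PySem.Chars.strip line.toList
  if remaining = [] then false
  else pvALoop remaining

-- ===== PORT B =====
-- B's while loop: find the next '}}', check the chunk s[:j+2] against MARKERS,
-- continue on s[j+2:].lstrip()
def pvBLoop (s : List Char) : Bool :=
  if hs : s = [] then true
  else
    if hj : PySem.Chars.find s ['}', '}'] = -1 then false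
    else
      if pvMarkers.contains
          (PySem.List.slice s none (some (PySem.Chars.find s ['}', '}'] + 2))) then
        pvBLoop (PySem.Chars.lstrip
          (PySem.List.slice s (some (PySem.Chars.find s ['}', '}'] + 2)) none))
      else false
termination_by s.length
decreasing_by
  have h0 : -1 ≤ PySem.Chars.find s ['}', '}'] := PySem.Chars.neg_one_le_find s _
  have h1 : 0 ≤ PySem.Chars.find s ['}', '}'] + 2 := by omega
  rw [PySem.List.slice_from s h1]
  calc (PySem.Chars.lstrip (s.drop (PySem.Chars.find s ['}', '}'] + 2).toNat)).length
      ≤ (s.drop (PySem.Chars.find s ['}', '}'] + 2).toNat).length := by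
        have : PySem.Chars.lstrip (s.drop (PySem.Chars.find s ['}', '}'] + 2).toNat)
            = (s.drop (PySem.Chars.find s ['}', '}'] + 2).toNat).dropWhile PySem.Chars.isspace := by
          simp [PySem.Chars.lstrip]
        rw [this]; exact List.length_dropWhile_le _ _
    _ < s.length := by
        have hk : 1 ≤ (PySem.Chars.find s ['}', '}'] + 2).toNat := by omega
        have hsn : 0 < s.length := by cases s <;> simp_all
        simp only [List.length_drop]
        omega

def is_marker_only_line_alt (line : String) : Bool :=
  let s := PySem.Chars.strip line.toList
  if s = [] then false
  else pvBLoop s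

-- ===== PRECONDITION & SPEC =====
def Spec_is_marker_only_line (line : String) (out : Bool) : Prop := out = is_marker_only_line_alt line
instance (line : String) (out : Bool) : Decidable (Spec_is_marker_only_line line out) := by unfold Spec_is_marker_only_line; infer_instance

-- ===== CLAIM (what is proved, stated in full; the proofs are below) =====
def Claim_equal_is_marker_only_line : Prop := ∀ (line : String), Dom_is_marker_only_line line → Spec_is_marker_only_line line (is_marker_only_line line)

-- ===== LEMMAS AND PROOFS =====

-- no two adjacent chars are '}' '}'
def pvNoPair : List Char → Bool
  | [] => true
  | [_] => true
  | a :: b :: rest => !(a == '}' && b == '}') && pvNoPair (b :: rest)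

-- every marker is pre ++ "}}" where pre (even extended by one '}') has no "}}" pair
theorem pvMarker_shape : ∀ m ∈ pvMarkers,
    m = m.dropLast.dropLast ++ ['}', '}'] ∧ pvNoPair (m.dropLast.dropLast ++ ['}']) = true
      ∧ m.dropLast.dropLast ≠ [] := by decide

theorem pvALoop_step_some (s r : List Char) (hnil : s ≠ [])
    (h : pvAStep pvMarkers s = some r) : pvALoop s = pvALoop r := by
  rw [pvALoop, dif_neg hnil]
  split <;> simp_all

theorem pvALoop_step_none (s : List Char) (hnil : s ≠ [])
    (h : pvAStep pvMarkers s = none) : pvALoop s = false := by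
  rw [pvALoop, dif_neg hnil]
  split <;> simp_all

theorem pvAStep_some : ∀ (ms : List (List Char)) (s r : List Char),
    pvAStep ms s = some r →
      ∃ m ∈ ms, m <+: s ∧ r = PySem.Chars.lstrip (s.drop m.length) := by
  intro ms
  induction ms with
  | nil => intro s r h; simp [pvAStep] at h
  | cons m ms ih =>
    intro s r h
    simp only [pvAStep] at h
    split at h
    · rename_i hsw
      exact ⟨m, by simp, (PySem.Chars.startswith_iff s m).mp hsw, (Option.some.inj h).symm⟩
    · obtain ⟨m', hm', hp, hr⟩ := ih s r h
      exact ⟨m', by simp [hm'], hp, hr⟩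

theorem pvAStep_none : ∀ (ms : List (List Char)) (s : List Char),
    pvAStep ms s = none → ∀ m ∈ ms, ¬ m <+: s := by
  intro ms
  induction ms with
  | nil => simp
  | cons m ms ih =>
    intro s h m' hm'
    simp only [pvAStep] at h
    split at h
    · simp at h
    · rename_i hsw
      rcases hm' with _ | hm'
      · intro hp
        exact hsw ((PySem.Chars.startswith_iff s m).mpr hp)
      · exact ih s h m' (by assumption)

-- no occurrence of "}}" strictly before pre.length in pre ++ '}'::'}'::t
theorem pvNoEarly : ∀ (pre t : List Char), pvNoPair (pre ++ ['}']) = true →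
    ∀ i < pre.length, ¬ (['}', '}'] <+: (pre ++ '}' :: '}' :: t).drop i) := by
  intro pre
  induction pre with
  | nil => intro t _ i hi; simp at hi
  | cons c pre ih =>
    intro t hnp i hi
    match i with
    | 0 =>
      intro hpref
      simp only [List.cons_append, List.drop_zero] at hpref
      obtain ⟨u, hu⟩ := hpref
      cases pre with
      | nil =>
        simp only [List.nil_append, List.cons_append, List.nil_append] at hu
        have hc : c = '}' := by
          have := hu
          injection this with h1 _
          exact h1.symm
        simp [pvNoPair, hc] at hnp
      | cons d pre' =>
        simp only [List.cons_append] at hu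
        have hcd : c = '}' ∧ d = '}' := by
          injection hu with h1 h2
          injection h2 with h2 _
          exact ⟨h1.symm, h2.symm⟩
        simp [pvNoPair, hcd.1, hcd.2] at hnp
    | Nat.succ i' =>
      simp only [List.cons_append, List.drop_succ_cons]
      have hnp' : pvNoPair (pre ++ ['}']) = true := by
        cases pre with
        | nil => simp [pvNoPair]
        | cons d pre' =>
          simp only [List.cons_append, pvNoPair, Bool.and_eq_true] at hnp
          exact hnp.2
      exact ih t hnp' i' (by simpa using hi)

-- on a string beginning with a marker, find locates exactly the marker's closing "}}"
theorem pvFind_marker (pre t : List Char) (hnp : pvNoPair (pre ++ ['}']) = true) :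
    PySem.Chars.find (pre ++ '}' :: '}' :: t) ['}', '}'] = (pre.length : Int) := by
  have hinf : ['}', '}'] <:+: (pre ++ '}' :: '}' :: t) :=
    ⟨pre, t, by simp⟩
  have hnn : 0 ≤ PySem.Chars.find (pre ++ '}' :: '}' :: t) ['}', '}'] :=
    (PySem.Chars.find_nonneg_iff _ _).mpr hinf
  obtain ⟨hpref, hmin⟩ := PySem.Chars.find_spec hnn
  set k := (PySem.Chars.find (pre ++ '}' :: '}' :: t) ['}', '}']).toNat with hk
  have hpl : ['}', '}'] <+: (pre ++ '}' :: '}' :: t).drop pre.length := by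
    rw [show pre ++ '}' :: '}' :: t = pre ++ ('}' :: '}' :: t) from rfl, List.drop_left]
    exact ⟨t, rfl⟩
  have h1 : ¬ k < pre.length := fun h => pvNoEarly pre t hnp k h hpref
  have h2 : ¬ pre.length < k := fun h => hmin pre.length h hpl
  omega

-- chunk taken up to find+2 is exactly the leading marker, and the rest is t
theorem pvLoop_eq : ∀ (n : Nat) (s : List Char), s.length ≤ n → pvALoop s = pvBLoop s := by
  intro n
  induction n with
  | zero =>
    intro s hs
    have : s = [] := by cases s <;> simp_all
    subst this
    rw [pvALoop, pvBLoop]; simp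
  | succ n ih =>
    intro s hs
    by_cases hnil : s = []
    · subst hnil; rw [pvALoop, pvBLoop]; simp
    · cases hstep : pvAStep pvMarkers s with
      | none =>
        rw [pvALoop_step_none s hnil hstep, pvBLoop, dif_neg hnil]
        by_cases hj : PySem.Chars.find s ['}', '}'] = -1
        · rw [dif_pos hj]
        · rw [dif_neg hj]
          have h2 : 0 ≤ PySem.Chars.find s ['}', '}'] + 2 := by
            have := PySem.Chars.neg_one_le_find s ['}', '}']
            omega
          cases hcc : pvMarkers.contains
              (PySem.List.slice s none (some (PySem.Chars.find s ['}', '}'] + 2))) with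
          | false => simp
          | true =>
            exfalso
            have hmem : PySem.List.slice s none (some (PySem.Chars.find s ['}', '}'] + 2))
                ∈ pvMarkers := by simpa using hcc
            have hpre : PySem.List.slice s none (some (PySem.Chars.find s ['}', '}'] + 2))
                <+: s := by
              rw [PySem.List.slice_to s h2]; exact List.take_prefix _ s
            exact pvAStep_none pvMarkers s hstep _ hmem hpre
      | some r =>
        obtain ⟨m, hm, hpref, hr⟩ := pvAStep_some pvMarkers s r hstep
        obtain ⟨hshape, hnp, hpne⟩ := pvMarker_shape m hm
        set pre := m.dropLast.dropLast with hpredef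
        obtain ⟨t, ht⟩ := hpref
        have hst : s = pre ++ '}' :: '}' :: t := by
          rw [← ht, hshape]; simp
        have hfind : PySem.Chars.find s ['}', '}'] = (pre.length : Int) := by
          rw [hst]; exact pvFind_marker pre t hnp
        have hml : m.length = pre.length + 2 := by rw [hshape]; simp
        have hjne : ¬ PySem.Chars.find s ['}', '}'] = -1 := by rw [hfind]; omega
        have h2 : 0 ≤ PySem.Chars.find s ['}', '}'] + 2 := by rw [hfind]; omega
        have htn : (PySem.Chars.find s ['}', '}'] + 2).toNat = pre.length + 2 := by
          rw [hfind]; omega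
        have hchunk : PySem.List.slice s none (some (PySem.Chars.find s ['}', '}'] + 2)) = m := by
          rw [PySem.List.slice_to s h2, htn, hst]
          rw [show pre ++ '}' :: '}' :: t = (pre ++ ['}', '}']) ++ t by simp]
          rw [List.take_left' (by simp)]
          rw [hshape]
        have hcontains : pvMarkers.contains m = true := by
          simpa using hm
        have hdrop : PySem.List.slice s (some (PySem.Chars.find s ['}', '}'] + 2)) none = t := by
          rw [PySem.List.slice_from s h2, htn, hst]
          rw [show pre ++ '}' :: '}' :: t = (pre ++ ['}', '}']) ++ t by simp]
          exact List.drop_left' (by simp)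
        have hrt : r = PySem.Chars.lstrip t := by
          rw [hr, hst, hml]
          congr 1
          rw [show pre ++ '}' :: '}' :: t = (pre ++ ['}', '}']) ++ t by simp]
          exact List.drop_left' (by simp)
        rw [pvALoop_step_some s r hnil hstep, pvBLoop, dif_neg hnil, dif_neg hjne, hchunk,
          if_pos hcontains, hdrop, ← hrt]
        apply ih
        have hrlen : r.length ≤ t.length := by
          rw [hrt, show PySem.Chars.lstrip t = t.dropWhile PySem.Chars.isspace by
            simp [PySem.Chars.lstrip]]
          exact List.length_dropWhile_le _ _
        have : s.length = pre.length + 2 + t.length := by rw [hst]; simp; omega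
        omega

-- ===== VERDICT (by name: the statement is the Claim_ definition above) =====
theorem is_marker_only_line_spec : Claim_equal_is_marker_only_line := by
  intro line _
  unfold Spec_is_marker_only_line is_marker_only_line is_marker_only_line_alt
  by_cases h : PySem.Chars.strip line.toList = []
  · simp [h]
  · simp only [h, if_false]
    exact pvLoop_eq _ _ (Nat.le_refl _)
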